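-- pv_equiv track=rewrite | github.com/arunabhamaity148-cell/arunabha_algo_bot | analysis/anchored_vwap.py | _confluence
-- ===== SOURCE A (Python) =====
-- from typing import List, Dict, Optional, Tuple
--
-- def _confluence(
--     pos_session: str, pos_weekly: str, pos_event: str
-- ) -> Tuple[int, str]:
--     """
--     Score: 1 pt per VWAP that agrees with direction.
--     Direction: LONG if price above, SHORT if below.
--     AT = neutral (0.5 — treated as both).
--     """
--     long_count = 0
--     short_count = 0
--
--     for pos in [pos_session, pos_weekly, pos_event]:
--         if pos == "ABOVE":
--             long_count += 1
--         elif pos == "BELOW":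
--             short_count += 1
--         elif pos == "AT":
--             long_count += 0.5
--             short_count += 0.5
--         # NO_EVENT or UNKNOWN → skip
--
--     score = max(long_count, short_count)
--     score = round(score)  # 0, 1, 2, or 3
--
--     if long_count > short_count:
--         direction = "LONG"
--     elif short_count > long_count:
--         direction = "SHORT"
--     else:
--         direction = "MIXED"
--
--     return score, direction
-- ===== SOURCE B (Python) =====
-- # The three inputs are order-insensitive and only four token kinds matter, so the
-- # whole function is a lookup: normalise each position to a category, sort the three
-- # categories, and read (score, direction) from an exhaustive 20-entry table.
-- _VERDICT = {
--     ('-', '-', '-'): (0, 'MIXED'),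
--     ('-', '-', 'ABOVE'): (1, 'LONG'),
--     ('-', '-', 'AT'): (0, 'MIXED'),
--     ('-', '-', 'BELOW'): (1, 'SHORT'),
--     ('-', 'ABOVE', 'ABOVE'): (2, 'LONG'),
--     ('-', 'ABOVE', 'AT'): (2, 'LONG'),
--     ('-', 'ABOVE', 'BELOW'): (1, 'MIXED'),
--     ('-', 'AT', 'AT'): (1, 'MIXED'),
--     ('-', 'AT', 'BELOW'): (2, 'SHORT'),
--     ('-', 'BELOW', 'BELOW'): (2, 'SHORT'),
--     ('ABOVE', 'ABOVE', 'ABOVE'): (3, 'LONG'),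
--     ('ABOVE', 'ABOVE', 'AT'): (2, 'LONG'),
--     ('ABOVE', 'ABOVE', 'BELOW'): (2, 'LONG'),
--     ('ABOVE', 'AT', 'AT'): (2, 'LONG'),
--     ('ABOVE', 'AT', 'BELOW'): (2, 'MIXED'),
--     ('ABOVE', 'BELOW', 'BELOW'): (2, 'SHORT'),
--     ('AT', 'AT', 'AT'): (2, 'MIXED'),
--     ('AT', 'AT', 'BELOW'): (2, 'SHORT'),
--     ('AT', 'BELOW', 'BELOW'): (2, 'SHORT'),
--     ('BELOW', 'BELOW', 'BELOW'): (3, 'SHORT'),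
-- }
--
-- def _confluence(pos_session, pos_weekly, pos_event):
--     def cat(p):
--         return p if p in ('ABOVE', 'BELOW', 'AT') else '-'
--     key = tuple(sorted(cat(p) for p in (pos_session, pos_weekly, pos_event)))
--     return _VERDICT[key]
-- ===== Notes on version B (the rewrite author's own statement) =====
-- stated objective: alternative
-- what changed: Replaced the per-element dual float accumulation, max and round() with a single lookup: each input is normalised to one of four categories, the three categories are sorted into a canonical key, and (score, direction) are read from an exhaustive precomputed 20-entry table over the category multisets.
import Mathlib
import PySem

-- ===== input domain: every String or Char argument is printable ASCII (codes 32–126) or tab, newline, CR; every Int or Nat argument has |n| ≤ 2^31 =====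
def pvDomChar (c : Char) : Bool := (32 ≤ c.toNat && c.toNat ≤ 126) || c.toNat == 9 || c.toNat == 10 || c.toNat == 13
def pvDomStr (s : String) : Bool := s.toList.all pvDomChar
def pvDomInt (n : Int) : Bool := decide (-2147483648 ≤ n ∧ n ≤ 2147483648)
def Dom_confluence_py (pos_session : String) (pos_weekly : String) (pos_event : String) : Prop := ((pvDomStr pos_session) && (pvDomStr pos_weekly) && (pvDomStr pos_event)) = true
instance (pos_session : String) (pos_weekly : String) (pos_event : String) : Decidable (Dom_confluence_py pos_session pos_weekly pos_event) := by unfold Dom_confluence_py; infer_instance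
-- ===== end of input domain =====

-- B replaces A's accumulate-max-round computation with a sorted-category key and an
-- exhaustive precomputed verdict table (objective: alternative, same cost).

-- ===== PORT A =====
-- A's float accumulators only ever hold multiples of 0.5, so the port tracks them
-- exactly as DOUBLED integers (long2 = 2*long_count, short2 = 2*short_count);
-- Python's round() (round-half-to-even) on such a half-integer k/2 is pvRound2.
def pvRound2 (k : Int) : Int :=
  if k % 2 = 0 then k / 2
  else if (k / 2) % 2 = 0 then k / 2 else k / 2 + 1

def pvStepA (st : Int × Int) (pos : String) : Int × Int :=
  if pos = "ABOVE" then (st.1 + 2, st.2)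
  else if pos = "BELOW" then (st.1, st.2 + 2)
  else if pos = "AT" then (st.1 + 1, st.2 + 1)
  else st

def confluence_py (pos_session : String) (pos_weekly : String) (pos_event : String) : Int × String :=
  let st := [pos_session, pos_weekly, pos_event].foldl pvStepA (0, 0)
  let score := pvRound2 (max st.1 st.2)
  let direction :=
    if st.1 > st.2 then "LONG"
    else if st.2 > st.1 then "SHORT"
    else "MIXED"
  (score, direction)

-- ===== PORT B =====
-- Source B's module-level _VERDICT dict, as a PySem.Dict keyed by the sorted category triple.
def pvVerdict : PySem.Dict (String × String × String) (Int × String) :=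
  PySem.Dict.ofList [
    (("-", "-", "-"), (0, "MIXED")),
    (("-", "-", "ABOVE"), (1, "LONG")),
    (("-", "-", "AT"), (0, "MIXED")),
    (("-", "-", "BELOW"), (1, "SHORT")),
    (("-", "ABOVE", "ABOVE"), (2, "LONG")),
    (("-", "ABOVE", "AT"), (2, "LONG")),
    (("-", "ABOVE", "BELOW"), (1, "MIXED")),
    (("-", "AT", "AT"), (1, "MIXED")),
    (("-", "AT", "BELOW"), (2, "SHORT")),
    (("-", "BELOW", "BELOW"), (2, "SHORT")),
    (("ABOVE", "ABOVE", "ABOVE"), (3, "LONG")),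
    (("ABOVE", "ABOVE", "AT"), (2, "LONG")),
    (("ABOVE", "ABOVE", "BELOW"), (2, "LONG")),
    (("ABOVE", "AT", "AT"), (2, "LONG")),
    (("ABOVE", "AT", "BELOW"), (2, "MIXED")),
    (("ABOVE", "BELOW", "BELOW"), (2, "SHORT")),
    (("AT", "AT", "AT"), (2, "MIXED")),
    (("AT", "AT", "BELOW"), (2, "SHORT")),
    (("AT", "BELOW", "BELOW"), (2, "SHORT")),
    (("BELOW", "BELOW", "BELOW"), (3, "SHORT"))]

-- Source B's local cat(p)
def pvCatB (p : String) : String :=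
  if p = "ABOVE" ∨ p = "BELOW" ∨ p = "AT" then p else "-"

def confluence_py_alt (pos_session : String) (pos_weekly : String) (pos_event : String) : Int × String :=
  let key :=
    match PySem.List.sorted ([pos_session, pos_weekly, pos_event].map pvCatB) (fun x => x) with
    | [x, y, z] => (x, y, z)
    | _ => ("-", "-", "-")  -- unreachable: sorted preserves length 3
  -- _VERDICT[key]; the key is always present (cat yields one of the four categories),
  -- so the KeyError branch is unreachable and the default is never returned
  (PySem.Dict.get? pvVerdict key).getD (0, "MIXED")

-- ===== PRECONDITION & SPEC =====
def Spec_confluence_py (pos_session : String) (pos_weekly : String) (pos_event : String) (out : Int × String) : Prop := out = confluence_py_alt pos_session pos_weekly pos_event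
instance (pos_session : String) (pos_weekly : String) (pos_event : String) (out : Int × String) : Decidable (Spec_confluence_py pos_session pos_weekly pos_event out) := by unfold Spec_confluence_py; infer_instance

-- ===== CLAIM (what is proved, stated in full; the proofs are below) =====
def Claim_equal_confluence_py : Prop := ∀ (pos_session : String) (pos_weekly : String) (pos_event : String), Dom_confluence_py pos_session pos_weekly pos_event → Spec_confluence_py pos_session pos_weekly pos_event (confluence_py pos_session pos_weekly pos_event)

-- ===== LEMMAS AND PROOFS =====

-- Each input string matters only through its category: 0 = "ABOVE", 1 = "BELOW",
-- 2 = "AT", 3 = anything else.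
def pvCls (s : String) : Fin 4 :=
  if s = "ABOVE" then 0 else if s = "BELOW" then 1 else if s = "AT" then 2 else 3

def pvCat (c : Fin 4) : String :=
  match c with | 0 => "ABOVE" | 1 => "BELOW" | 2 => "AT" | 3 => "-"

theorem pvCatB_eq (s : String) : pvCatB s = pvCat (pvCls s) := by
  unfold pvCatB pvCls
  split_ifs <;> simp_all [pvCat]

-- A's computation expressed on categories
def pvStepC (st : Int × Int) (c : Fin 4) : Int × Int :=
  if c = 0 then (st.1 + 2, st.2)
  else if c = 1 then (st.1, st.2 + 2)
  else if c = 2 then (st.1 + 1, st.2 + 1)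
  else st

def pvA (c1 c2 c3 : Fin 4) : Int × String :=
  let st := [c1, c2, c3].foldl pvStepC (0, 0)
  let score := pvRound2 (max st.1 st.2)
  let direction :=
    if st.1 > st.2 then "LONG" else if st.2 > st.1 then "SHORT" else "MIXED"
  (score, direction)

-- B's computation expressed on categories
def pvB (c1 c2 c3 : Fin 4) : Int × String :=
  let key :=
    match PySem.List.sorted [pvCat c1, pvCat c2, pvCat c3] (fun x => x) with
    | [x, y, z] => (x, y, z)
    | _ => ("-", "-", "-")
  (PySem.Dict.get? pvVerdict key).getD (0, "MIXED")

theorem pvA_eq (s1 s2 s3 : String) :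
    confluence_py s1 s2 s3 = pvA (pvCls s1) (pvCls s2) (pvCls s3) := by
  have hstep : ∀ (st : Int × Int) (s : String), pvStepA st s = pvStepC st (pvCls s) := by
    intro st s
    unfold pvStepA pvStepC pvCls
    split_ifs <;> simp_all
  unfold confluence_py pvA
  simp only [List.foldl, hstep]
  rfl

theorem pvB_eq (s1 s2 s3 : String) :
    confluence_py_alt s1 s2 s3 = pvB (pvCls s1) (pvCls s2) (pvCls s3) := by
  unfold confluence_py_alt pvB
  simp only [List.map, pvCatB_eq]

-- concrete comparisons of the four category strings ('decide' is stuck on String's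
-- LT instance, so they are resolved once here via toList)
theorem pvD1 : (decide (("-":String) < "-")) = false := by
  simp only [decide_eq_false_iff_not, String.lt_iff_toList_lt]; decide

theorem pvD2 : (decide (("-":String) < "ABOVE")) = true := by
  simp only [decide_eq_true_eq, String.lt_iff_toList_lt]; decide

theorem pvD3 : (decide (("-":String) < "AT")) = true := by
  simp only [decide_eq_true_eq, String.lt_iff_toList_lt]; decide

theorem pvD4 : (decide (("-":String) < "BELOW")) = true := by
  simp only [decide_eq_true_eq, String.lt_iff_toList_lt]; decide

theorem pvD5 : (decide (("ABOVE":String) < "-")) = false := by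
  simp only [decide_eq_false_iff_not, String.lt_iff_toList_lt]; decide

theorem pvD6 : (decide (("ABOVE":String) < "ABOVE")) = false := by
  simp only [decide_eq_false_iff_not, String.lt_iff_toList_lt]; decide

theorem pvD7 : (decide (("ABOVE":String) < "AT")) = true := by
  simp only [decide_eq_true_eq, String.lt_iff_toList_lt]; decide

theorem pvD8 : (decide (("ABOVE":String) < "BELOW")) = true := by
  simp only [decide_eq_true_eq, String.lt_iff_toList_lt]; decide

theorem pvD9 : (decide (("AT":String) < "-")) = false := by
  simp only [decide_eq_false_iff_not, String.lt_iff_toList_lt]; decide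

theorem pvD10 : (decide (("AT":String) < "ABOVE")) = false := by
  simp only [decide_eq_false_iff_not, String.lt_iff_toList_lt]; decide

theorem pvD11 : (decide (("AT":String) < "AT")) = false := by
  simp only [decide_eq_false_iff_not, String.lt_iff_toList_lt]; decide

theorem pvD12 : (decide (("AT":String) < "BELOW")) = true := by
  simp only [decide_eq_true_eq, String.lt_iff_toList_lt]; decide

theorem pvD13 : (decide (("BELOW":String) < "-")) = false := by
  simp only [decide_eq_false_iff_not, String.lt_iff_toList_lt]; decide

theorem pvD14 : (decide (("BELOW":String) < "ABOVE")) = false := by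
  simp only [decide_eq_false_iff_not, String.lt_iff_toList_lt]; decide

theorem pvD15 : (decide (("BELOW":String) < "AT")) = false := by
  simp only [decide_eq_false_iff_not, String.lt_iff_toList_lt]; decide

theorem pvD16 : (decide (("BELOW":String) < "BELOW")) = false := by
  simp only [decide_eq_false_iff_not, String.lt_iff_toList_lt]; decide

theorem pvAB : ∀ (c1 c2 c3 : Fin 4), pvA c1 c2 c3 = pvB c1 c2 c3 := by
  intro c1 c2 c3
  fin_cases c1 <;> fin_cases c2 <;> fin_cases c3 <;>
    (simp only [pvA, pvB, pvCat]
     rw [PySem.List.sorted_eq_foldl_insertBy]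
     simp only [List.foldl, PySem.List.insertBy, pvD1, pvD2, pvD3, pvD4, pvD5, pvD6,
       pvD7, pvD8, pvD9, pvD10, pvD11, pvD12, pvD13, pvD14, pvD15, pvD16,
       if_true, if_false, Bool.false_eq_true]
     rfl)

-- ===== VERDICT (by name: the statement is the Claim_ definition above) =====
theorem confluence_py_spec : Claim_equal_confluence_py := by
  intro s1 s2 s3 _
  unfold Spec_confluence_py
  rw [pvA_eq, pvB_eq, pvAB]
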